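-- pv_equiv track=rewrite | github.com/MingyuGuan/rpc | actor/container_rpc.py | string_to_output_type
-- ===== SOURCE A (Python) =====
-- OUTPUT_TYPE_BYTES = 0
--
-- OUTPUT_TYPE_INTS = 1
--
-- OUTPUT_TYPE_FLOATS = 2
--
-- OUTPUT_TYPE_DOUBLES = 3
--
-- OUTPUT_TYPE_STRINGS = 4
--
-- OUTPUT_TYPE_ABSTRACT = 5
--
-- def string_to_output_type(output_str):
--     output_str = output_str.strip().lower()
--     byte_strs = ["b", "bytes", "byte"]
--     int_strs = ["i", "ints", "int", "integer", "integers", "<class \'int\'>"]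
--     float_strs = ["f", "floats", "float", "<class \'float\'>"]
--     double_strs = ["d", "doubles", "double"]
--     string_strs = ["s", "strings", "string", "strs", "str", "<class \'str\'>"]
--
--     if any(output_str == s for s in byte_strs):
--         return OUTPUT_TYPE_BYTES
--     elif any(output_str == s for s in int_strs):
--         return OUTPUT_TYPE_INTS
--     elif any(output_str == s for s in float_strs):
--         return OUTPUT_TYPE_FLOATS
--     elif any(output_str == s for s in double_strs):
--         return OUTPUT_TYPE_DOUBLES
--     elif any(output_str == s for s in string_strs):
--         return OUTPUT_TYPE_STRINGS
--     else:
--         return OUTPUT_TYPE_ABSTRACT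
-- ===== SOURCE B (Python) =====
-- def string_to_output_type(output_str):
--     w = output_str.strip().lower()
--     # "<class 'X'>" reflection form: unwrap and match the inner name
--     if w.startswith("<class '") and w.endswith("'>"):
--         inner = w[8:-2]
--         if inner == "int":
--             return 1
--         if inner == "float":
--             return 2
--         if inner == "str":
--             return 4
--         return 5
--     # plain label: depluralize a trailing 's' (only words longer than 2 chars),
--     # then match the singular root or the one-letter abbreviation
--     if len(w) > 2 and w.endswith("s"):
--         root = w[:-1]
--     else:
--         root = w
--     if root == "b" or root == "byte":
--         return 0
--     if root == "i" or root == "int" or root == "integer":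
--         return 1
--     if root == "f" or root == "float":
--         return 2
--     if root == "d" or root == "double":
--         return 3
--     if root == "s" or root == "str" or root == "string":
--         return 4
--     return 5
-- ===== Notes on version B (the rewrite author's own statement) =====
-- stated objective: alternative
-- what changed: Instead of scanning five label lists, B canonicalizes the input: it unwraps the class-reflection wrapper form and strips a plural suffix from words longer than two characters, then matches only the singular roots and one-letter abbreviations.
import Mathlib
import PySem

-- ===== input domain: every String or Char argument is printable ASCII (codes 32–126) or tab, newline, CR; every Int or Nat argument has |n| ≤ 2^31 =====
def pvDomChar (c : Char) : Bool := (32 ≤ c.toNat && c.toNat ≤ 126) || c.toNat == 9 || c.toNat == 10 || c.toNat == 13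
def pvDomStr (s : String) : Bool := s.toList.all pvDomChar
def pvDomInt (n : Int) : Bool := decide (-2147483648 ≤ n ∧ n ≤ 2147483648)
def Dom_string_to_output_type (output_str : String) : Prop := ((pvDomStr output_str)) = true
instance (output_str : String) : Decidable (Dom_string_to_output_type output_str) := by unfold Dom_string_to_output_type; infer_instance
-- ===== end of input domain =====

-- B replaces A's five sequential label-list scans by canonicalization (unwrap the class-reflection wrapper form, depluralize a trailing plural suffix) followed by singular-root matching (objective: alternative); return values proved equal on all domain inputs.


-- ===== PORT A =====
def string_to_output_type (output_str : String) : Int :=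
  let s := PySem.Str.lower (PySem.Str.strip output_str)
  let byte_strs : List String := ["b", "bytes", "byte"]
  let int_strs : List String := ["i", "ints", "int", "integer", "integers", "<class 'int'>"]
  let float_strs : List String := ["f", "floats", "float", "<class 'float'>"]
  let double_strs : List String := ["d", "doubles", "double"]
  let string_strs : List String := ["s", "strings", "string", "strs", "str", "<class 'str'>"]
  if byte_strs.any (fun x => s == x) then 0
  else if int_strs.any (fun x => s == x) then 1
  else if float_strs.any (fun x => s == x) then 2
  else if double_strs.any (fun x => s == x) then 3
  else if string_strs.any (fun x => s == x) then 4
  else 5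
-- ===== PORT B =====
def string_to_output_type_alt (output_str : String) : Int :=
  let w := PySem.Str.lower (PySem.Str.strip output_str)
  if PySem.Str.startswith w "<class '" && PySem.Str.endswith w "'>" then
    let inner := PySem.Str.slice w (some 8) (some (-2))
    if inner == "int" then 1
    else if inner == "float" then 2
    else if inner == "str" then 4
    else 5
  else
    let root := if decide ((2 : Int) < PySem.Str.len w) && PySem.Str.endswith w "s"
                then PySem.Str.slice w none (some (-1)) else w
    if root == "b" || root == "byte" then 0
    else if root == "i" || root == "int" || root == "integer" then 1
    else if root == "f" || root == "float" then 2
    else if root == "d" || root == "double" then 3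
    else if root == "s" || root == "str" || root == "string" then 4
    else 5


-- ===== PRECONDITION & SPEC =====
def Spec_string_to_output_type (output_str : String) (out : Int) : Prop := out = string_to_output_type_alt output_str
instance (output_str : String) (out : Int) : Decidable (Spec_string_to_output_type output_str out) := by unfold Spec_string_to_output_type; infer_instance

-- ===== CLAIM (what is proved, stated in full; the proofs are below) =====
def Claim_equal_string_to_output_type : Prop := ∀ (output_str : String), Dom_string_to_output_type output_str → Spec_string_to_output_type output_str (string_to_output_type output_str)

-- ===== LEMMAS AND PROOFS =====
lemma slice_8_neg2 (l : List Char) :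
    PySem.List.slice l (some 8) (some (-2)) = (l.drop 8).take (l.length - 10) := by
  simp only [PySem.List.slice, PySem.List.clampIdx]
  norm_num
  by_cases hl : l.length ≤ 1
  · rw [if_pos hl]
    have h10 : l.length - 10 = 0 := by omega
    simp [h10]
  · rw [if_neg hl]
    by_cases h : 8 ≤ l.length
    · have hmin : min (Int.toNat 8) l.length = 8 := by
        have h8 : Int.toNat 8 = 8 := rfl
        omega
      rw [hmin]; congr 1; omega
    · have h8 : Int.toNat 8 = 8 := rfl
      rw [List.drop_eq_nil_of_le (i := min (Int.toNat 8) l.length) (by omega),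
        List.drop_eq_nil_of_le (i := 8) (by omega)]
      simp

lemma depl_eq (w : String) (h2 : PySem.Str.endswith w "s" = true) :
    w.toList = (PySem.Str.slice w none (some (-1))).toList ++ ['s'] := by
  rw [PySem.Str.slice_to_neg_one]
  rw [PySem.Str.endswith_eq, PySem.Chars.endswith_iff] at h2
  obtain ⟨u, hu⟩ := h2
  rw [← hu]
  have hs : "s".toList = ['s'] := rfl
  rw [hs, List.dropLast_concat]

lemma root_plural (w X Y : String) (h2 : PySem.Str.endswith w "s" = true)
    (hroot : PySem.Str.slice w none (some (-1)) = X)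
    (hXY : X.toList ++ ['s'] = Y.toList) : w = Y := by
  apply String.toList_inj.mp
  rw [depl_eq w h2, hroot, hXY]

lemma wrapper_eq (w : String) (cs : List Char)
    (h1 : PySem.Str.startswith w "<class '" = true)
    (h2 : PySem.Str.endswith w "'>" = true)
    (h3 : (PySem.Str.slice w (some 8) (some (-2))).toList = cs)
    (hne : cs ≠ []) : w.toList = "<class '".toList ++ cs ++ "'>".toList := by
  rw [PySem.Str.startswith_eq, PySem.Chars.startswith_iff] at h1
  obtain ⟨r, hr⟩ := h1
  rw [PySem.Str.endswith_eq, PySem.Chars.endswith_iff] at h2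
  obtain ⟨u, hu⟩ := h2
  rw [PySem.Str.toList_slice, PySem.Chars.slice_eq_listSlice, slice_8_neg2] at h3
  rw [← hr] at hu h3
  have hpre : ("<class '".toList).length = 8 := by decide
  have hsuf : ("'>".toList).length = 2 := by decide
  have hdrop8 : List.drop 8 ("<class '".toList ++ r) = r := by
    conv_lhs => rw [← hpre]
    exact List.drop_left
  have hcs : r.take (r.length - 2) = cs := by
    rw [hdrop8] at h3
    rw [show ("<class '".toList ++ r).length - 10 = r.length - 2 from by
      simp only [List.length_append, hpre]; omega] at h3
    exact h3
  have hr3 : 3 ≤ r.length := by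
    by_contra hlt
    have h0 : r.length - 2 = 0 := by omega
    rw [h0, List.take_zero] at hcs
    exact hne hcs.symm
  have hulen : u.length = 8 + (r.length - 2) := by
    have hl := congrArg List.length hu
    simp only [List.length_append, hpre, hsuf] at hl
    omega
  have hdrop : r.drop (r.length - 2) = "'>".toList := by
    have h := congrArg (List.drop u.length) hu
    rw [List.drop_left] at h
    rw [hulen, ← List.drop_drop, hdrop8] at h
    exact h.symm
  rw [← hr, ← hcs, ← hdrop, List.append_assoc, List.take_append_drop]

set_option maxHeartbeats 1000000 in
theorem main_eq (t : String) : string_to_output_type t = string_to_output_type_alt t := by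
  simp only [string_to_output_type, string_to_output_type_alt]
  generalize PySem.Str.lower (PySem.Str.strip t) = w
  by_cases e1 : w = "b"; · subst e1; decide
  by_cases e2 : w = "bytes"; · subst e2; decide
  by_cases e3 : w = "byte"; · subst e3; decide
  by_cases e4 : w = "i"; · subst e4; decide
  by_cases e5 : w = "ints"; · subst e5; decide
  by_cases e6 : w = "int"; · subst e6; decide
  by_cases e7 : w = "integer"; · subst e7; decide
  by_cases e8 : w = "integers"; · subst e8; decide
  by_cases e9 : w = "<class 'int'>"; · subst e9; decide
  by_cases e10 : w = "f"; · subst e10; decide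
  by_cases e11 : w = "floats"; · subst e11; decide
  by_cases e12 : w = "float"; · subst e12; decide
  by_cases e13 : w = "<class 'float'>"; · subst e13; decide
  by_cases e14 : w = "d"; · subst e14; decide
  by_cases e15 : w = "doubles"; · subst e15; decide
  by_cases e16 : w = "double"; · subst e16; decide
  by_cases e17 : w = "s"; · subst e17; decide
  by_cases e18 : w = "strings"; · subst e18; decide
  by_cases e19 : w = "string"; · subst e19; decide
  by_cases e20 : w = "strs"; · subst e20; decide
  by_cases e21 : w = "str"; · subst e21; decide
  by_cases e22 : w = "<class 'str'>"; · subst e22; decide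
  simp only [List.any_cons, List.any_nil, Bool.or_eq_true, beq_iff_eq,
    e1, e2, e3, e4, e5, e6, e7, e8, e9, e10, e11, e12, e13, e14, e15, e16,
    e17, e18, e19, e20, e21, e22]
  by_cases hw : (PySem.Str.startswith w "<class '" && PySem.Str.endswith w "'>") = true
  · rw [if_pos hw]
    obtain ⟨hsw, hew⟩ := (Bool.and_eq_true _ _).mp hw
    have hint : ¬ (PySem.Str.slice w (some 8) (some (-2)) = "int") := by
      intro he
      refine e9 (String.toList_inj.mp ?_)
      rw [wrapper_eq w ("int".toList) hsw hew (by rw [he]) (by decide)]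
      decide
    have hfl : ¬ (PySem.Str.slice w (some 8) (some (-2)) = "float") := by
      intro he
      refine e13 (String.toList_inj.mp ?_)
      rw [wrapper_eq w ("float".toList) hsw hew (by rw [he]) (by decide)]
      decide
    have hst : ¬ (PySem.Str.slice w (some 8) (some (-2)) = "str") := by
      intro he
      refine e22 (String.toList_inj.mp ?_)
      rw [wrapper_eq w ("str".toList) hsw hew (by rw [he]) (by decide)]
      decide
    simp [hint, hfl, hst]
  · rw [if_neg hw]
    by_cases hc : (decide ((2 : Int) < PySem.Str.len w) && PySem.Str.endswith w "s") = true
    · obtain ⟨hlen', hes⟩ := (Bool.and_eq_true _ _).mp hc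
      have hlen : (2 : Int) < PySem.Str.len w := of_decide_eq_true hlen'
      have short : ∀ X Y : String, X.toList ++ ['s'] = Y.toList →
          PySem.Str.len Y ≤ 2 → ¬ (PySem.Str.slice w none (some (-1)) = X) := by
        intro X Y hXY hY h
        rw [root_plural w X Y hes h hXY] at hlen
        omega
      have long : ∀ X Y : String, X.toList ++ ['s'] = Y.toList →
          ¬ (w = Y) → ¬ (PySem.Str.slice w none (some (-1)) = X) := by
        intro X Y hXY hne h
        exact hne (root_plural w X Y hes h hXY)
      simp only [if_pos hc]
      simp [short "b" "bs" (by decide) (by decide), long "byte" "bytes" (by decide) e2,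
        short "i" "is" (by decide) (by decide), long "int" "ints" (by decide) e5,
        long "integer" "integers" (by decide) e8,
        short "f" "fs" (by decide) (by decide), long "float" "floats" (by decide) e11,
        short "d" "ds" (by decide) (by decide), long "double" "doubles" (by decide) e15,
        short "s" "ss" (by decide) (by decide), long "str" "strs" (by decide) e20,
        long "string" "strings" (by decide) e18]
    · simp only [if_neg hc]
      simp [e1, e3, e4, e6, e7, e10, e12, e14, e16, e17, e19, e21]

-- ===== VERDICT (by name: the statement is the Claim_ definition above) =====
theorem string_to_output_type_spec : Claim_equal_string_to_output_type := by
  intro s _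
  exact main_eq s
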